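-- pv_equiv track=rewrite | github.com/qmShen/promoDemo | backend/StoryEvaluator.py | get_relation_type
-- ===== SOURCE A (Python) =====
-- def get_relation_type(s1, s2):
--     sbs_list1 = s1.split('_') if type(s1) is str else s1
--     sbs_list2 = s2.split('_') if type(s2) is str else s2
--     assert len(sbs_list1) == len(sbs_list2)
--     length = len(sbs_list1)
--     larger = False
--     compare_results = [2 if sbs_list1[i] == sbs_list2[i] #左右相等
--                        else 3 if sbs_list1[i] == '*' and sbs_list2[i] != '*'  # 左边是右边的parants
--                        else 0 if sbs_list1[i] != '*' and sbs_list2[i] == '*' # 右边是左边的parants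
--                        else 1 if (sbs_list1[i] != sbs_list2[i]) and (sbs_list1[i] != '*' and sbs_list2[i] != '*')
--                        else -1
--                        for i in range(0, length)]
--
--     if compare_results.count(3) == 1 and compare_results.count(2) == length-1:
--         return '>', compare_results.index(3)
--     elif compare_results.count(0) == 1 and compare_results.count(2) == length-1:
--         return '<', compare_results.index(0)
--     elif compare_results.count(2) == len(sbs_list1):
--         return 'same', None
--     elif compare_results.count(1) == 1 and compare_results.count(2) == length-1:
--         if compare_results[0] == 1:
--             return 'temporal', compare_results.index(1)
--         else:
--             return 'brothers', compare_results.index(1)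
--     return None, None
-- ===== SOURCE B (Python) =====
-- def get_relation_type(s1, s2):
--     l1 = s1.split('_') if type(s1) is str else s1
--     l2 = s2.split('_') if type(s2) is str else s2
--     assert len(l1) == len(l2)
--     diffs = [(i, p) for i, p in enumerate(zip(l1, l2)) if p[0] != p[1]]
--     if not diffs:
--         return 'same', None
--     if len(diffs) == 1:
--         d, (a, b) = diffs[0]
--         if a == '*':
--             return '>', d
--         if b == '*':
--             return '<', d
--         return ('temporal', d) if d == 0 else ('brothers', d)
--     return None, None
-- ===== Notes on version B (the rewrite author's own statement) =====
-- stated objective: simpler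
-- what changed: B never builds or scans A's category-code list: it collects the list of mismatching positions (with their element pairs), returns 'same' when it is empty, classifies the single mismatch pair directly ('>' if the left element is '*', '<' if the right is, else temporal/brothers by its position) when it has one element, and None,None otherwise.
import Mathlib
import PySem

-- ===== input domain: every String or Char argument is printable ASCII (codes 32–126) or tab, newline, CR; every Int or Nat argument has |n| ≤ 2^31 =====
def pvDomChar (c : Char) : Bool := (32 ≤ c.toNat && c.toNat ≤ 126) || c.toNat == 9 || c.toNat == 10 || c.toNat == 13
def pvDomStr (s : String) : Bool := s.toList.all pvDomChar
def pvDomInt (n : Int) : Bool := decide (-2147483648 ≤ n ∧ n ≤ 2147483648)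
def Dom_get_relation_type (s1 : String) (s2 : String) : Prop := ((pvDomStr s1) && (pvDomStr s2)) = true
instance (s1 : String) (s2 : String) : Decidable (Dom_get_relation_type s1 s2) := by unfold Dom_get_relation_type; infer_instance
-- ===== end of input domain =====

-- B drops A's category-code list entirely: it collects the mismatching positions and
-- classifies directly from whether there are 0, 1, or more mismatches.

-- ===== PORT A =====
-- s.split('_'): sep "_" is nonempty so split? is always some (exact)
def splitU (s : String) : List String := (PySem.Str.split? s "_").getD []

-- the comprehension's per-element value (A's branch order)
def pyCatA (a b : String) : Int :=
  if a == b then 2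
  else if a == "*" && b != "*" then 3
  else if a != "*" && b == "*" then 0
  else if (a != b) && (a != "*" && b != "*") then 1
  else -1

def get_relation_type (s1 : String) (s2 : String) : Option String × Option Int :=
  let l1 := splitU s1
  let l2 := splitU s2
  -- assert len(l1) == len(l2): Pre_get_relation_type excludes the AssertionError inputs
  let length : Int := l1.length
  let cr := (PySem.List.pyRange 0 length 1).map
      (fun i => pyCatA (PySem.List.pyGetD l1 i "") (PySem.List.pyGetD l2 i ""))
  if cr.count 3 = 1 ∧ (cr.count 2 : Int) = length - 1 then
    (some ">", (PySem.List.index? cr 3).map (fun n => (n : Int)))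
  else if cr.count 0 = 1 ∧ (cr.count 2 : Int) = length - 1 then
    (some "<", (PySem.List.index? cr 0).map (fun n => (n : Int)))
  else if cr.count 2 = l1.length then
    (some "same", none)
  else if cr.count 1 = 1 ∧ (cr.count 2 : Int) = length - 1 then
    -- compare_results[0]: cr is nonempty whenever this branch is reached, so pyGet? is some (no IndexError)
    if PySem.List.pyGet? cr 0 = some 1 then
      (some "temporal", (PySem.List.index? cr 1).map (fun n => (n : Int)))
    else
      (some "brothers", (PySem.List.index? cr 1).map (fun n => (n : Int)))
  else (none, none)

-- ===== PORT B =====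
def get_relation_type_alt (s1 : String) (s2 : String) : Option String × Option Int :=
  let l1 := splitU s1
  let l2 := splitU s2
  -- diffs = [(i, p) for i, p in enumerate(zip(l1, l2)) if p[0] != p[1]]
  let diffs := (PySem.List.enumerate (List.zip l1 l2) 0).filter (fun p => p.2.1 != p.2.2)
  match diffs with
  | [] => (some "same", none)
  | [(d, a, b)] =>
    if a == "*" then (some ">", some d)
    else if b == "*" then (some "<", some d)
    else if d = 0 then (some "temporal", some d)
    else (some "brothers", some d)
  | _ => (none, none)

-- ===== PRECONDITION & SPEC =====
-- A asserts the two splits have the same length; on unequal lengths it raises AssertionError.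
def Pre_get_relation_type (s1 : String) (s2 : String) : Prop :=
  (splitU s1).length = (splitU s2).length
instance (s1 : String) (s2 : String) : Decidable (Pre_get_relation_type s1 s2) := by
  unfold Pre_get_relation_type; infer_instance
def pvWitness_get_relation_type : String × String := ("a_*", "a_b")

def Spec_get_relation_type (s1 : String) (s2 : String) (out : Option String × Option Int) : Prop := out = get_relation_type_alt s1 s2
instance (s1 : String) (s2 : String) (out : Option String × Option Int) : Decidable (Spec_get_relation_type s1 s2 out) := by unfold Spec_get_relation_type; infer_instance

-- ===== CLAIM (what is proved, stated in full; the proofs are below) =====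
def Claim_equal_get_relation_type : Prop := ∀ (s1 : String) (s2 : String), Dom_get_relation_type s1 s2 → Pre_get_relation_type s1 s2 → Spec_get_relation_type s1 s2 (get_relation_type s1 s2)

-- ===== LEMMAS AND PROOFS =====

lemma cat_cases (a b : String) (h : a ≠ b) :
    (a = "*" ∧ pyCatA a b = 3) ∨ (a ≠ "*" ∧ b = "*" ∧ pyCatA a b = 0) ∨
    (a ≠ "*" ∧ b ≠ "*" ∧ pyCatA a b = 1) := by
  by_cases h2 : a = "*"
  · subst h2
    have hb : b ≠ "*" := fun hb => h hb.symm
    exact Or.inl ⟨rfl, by simp [pyCatA, h, hb]⟩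
  · by_cases h3 : b = "*"
    · exact Or.inr (Or.inl ⟨h2, h3, by simp [pyCatA, h2, h3]⟩)
    · exact Or.inr (Or.inr ⟨h2, h3, by simp [pyCatA, h, h2, h3]⟩)

lemma cat_eq_two_iff (a b : String) : pyCatA a b = 2 ↔ a = b := by
  constructor
  · intro hc
    by_contra h
    rcases cat_cases a b h with ⟨_, h3⟩ | ⟨_, _, h3⟩ | ⟨_, _, h3⟩ <;> omega
  · intro h; subst h; simp [pyCatA]

-- first index (counting from s) at which v occurs
def firstIdx (M : List Int) (v : Int) (s : Int) : Option Int :=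
  match M with
  | [] => none
  | c :: M => if c = v then some s else firstIdx M v (s + 1)

lemma firstIdx_eq_index? (M : List Int) (v : Int) (s : Int) :
    firstIdx M v s = Option.map (fun k : Nat => s + (k : Int)) (PySem.List.index? M v) := by
  induction M generalizing s with
  | nil => simp [firstIdx, PySem.List.index?_eq_idxOf?]
  | cons c M ih =>
    by_cases h : c = v
    · subst h; rw [PySem.List.index?_cons_self]; simp [firstIdx]
    · rw [PySem.List.index?_cons_of_ne M h]
      simp only [firstIdx, if_neg h, ih, Option.map_map]
      cases PySem.List.index? M v with
      | none => rfl
      | some k => simp [Function.comp]; omega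

-- the comprehension over range(len) with equal-length lists is a map over the zip
lemma cr_eq_zip (l1 l2 : List String) (h : l1.length = l2.length) :
    (PySem.List.pyRange 0 (l1.length : Int) 1).map
      (fun i => pyCatA (PySem.List.pyGetD l1 i "") (PySem.List.pyGetD l2 i ""))
    = (List.zip l1 l2).map (fun p => pyCatA p.1 p.2) := by
  apply List.ext_getElem
  · simp [PySem.List.length_pyRange_one, h]
  · intro k h1 h2
    simp only [List.length_map, PySem.List.length_pyRange_one] at h1
    simp only [List.getElem_map, PySem.List.getElem_pyRange_one, zero_add, List.getElem_zip]
    rw [PySem.List.pyGetD_natCast, PySem.List.pyGetD_natCast,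
        List.getD_eq_getElem _ _ (by omega), List.getD_eq_getElem _ _ (by omega)]

-- count of matches plus number of mismatches = length
lemma count2_add_diffs (L : List (String × String)) (s : Int) :
    (L.map (fun p => pyCatA p.1 p.2)).count 2
      + ((PySem.List.enumerate L s).filter (fun p => p.2.1 != p.2.2)).length = L.length := by
  induction L generalizing s with
  | nil => simp [PySem.List.enumerate_nil]
  | cons x L ih =>
    obtain ⟨a, b⟩ := x
    rw [PySem.List.enumerate_cons]
    by_cases h : a = b
    · subst h
      have := ih (s + 1)
      simp only [List.map_cons, List.filter_cons]
      rw [if_neg (by simp)]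
      simp [(cat_eq_two_iff a a).2 rfl]
      omega
    · have hc : pyCatA a b ≠ 2 := fun hc => h ((cat_eq_two_iff a b).1 hc)
      have := ih (s + 1)
      simp only [List.map_cons, List.filter_cons]
      rw [if_pos (by simpa using h)]
      simp [hc]
      omega

-- no mismatch: every code is 2
lemma empty_spec (L : List (String × String)) (s : Int)
    (h : (PySem.List.enumerate L s).filter (fun p => p.2.1 != p.2.2) = []) :
    (L.map (fun p => pyCatA p.1 p.2)).count 2 = L.length := by
  have := count2_add_diffs L s
  rw [h] at this; simpa using this

-- exactly one mismatch: the code list is all 2s except the single mismatch's code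
lemma single_spec (L : List (String × String)) (s d : Int) (a b : String)
    (h : (PySem.List.enumerate L s).filter (fun p => p.2.1 != p.2.2) = [(d, (a, b))]) :
    a ≠ b ∧ s ≤ d ∧
    (∀ v : Int, v ≠ 2 → (L.map (fun p => pyCatA p.1 p.2)).count v
        = (if pyCatA a b = v then 1 else 0)) ∧
    (∀ v : Int, v ≠ 2 → firstIdx (L.map (fun p => pyCatA p.1 p.2)) v s
        = (if pyCatA a b = v then some d else none)) ∧
    (PySem.List.pyGet? (L.map (fun p => pyCatA p.1 p.2)) 0 = some (pyCatA a b) ↔ d = s) := by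
  induction L generalizing s with
  | nil => simp [PySem.List.enumerate_nil] at h
  | cons x L ih =>
    obtain ⟨p, q⟩ := x
    rw [PySem.List.enumerate_cons] at h
    by_cases hpq : p = q
    · subst hpq
      rw [List.filter_cons, if_neg (by simp)] at h
      obtain ⟨hab, hsd, hcnt, hfi, hhd⟩ := ih (s + 1) h
      have hc2 : pyCatA p p = 2 := (cat_eq_two_iff p p).2 rfl
      have hcne : pyCatA a b ≠ 2 := fun hc => hab ((cat_eq_two_iff a b).1 hc)
      refine ⟨hab, by omega, ?_, ?_, ?_⟩
      · intro v hv
        simp only [List.map_cons, List.count_cons, hc2]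
        rw [hcnt v hv]
        simp [Ne.symm hv]
      · intro v hv
        simp only [List.map_cons, firstIdx, hc2, if_neg (fun hh : (2:Int) = v => hv hh.symm)]
        exact hfi v hv
      · simp only [List.map_cons, PySem.List.pyGet?_zero_cons, Option.some.injEq, hc2]
        constructor
        · intro hh; exact absurd hh.symm hcne
        · intro hh; omega
    · rw [List.filter_cons, if_pos (by simpa using hpq)] at h
      have hd : (s, (p, q)) = (d, (a, b)) ∧
          (PySem.List.enumerate L (s + 1)).filter (fun p => p.2.1 != p.2.2) = [] := by
        have := List.cons_eq_cons.mp h; exact ⟨this.1, this.2⟩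
      obtain ⟨heq, hnil⟩ := hd
      obtain ⟨hds, hpa, hqb⟩ : s = d ∧ p = a ∧ q = b := by
        refine ⟨congrArg Prod.fst heq, ?_, ?_⟩
        · exact congrArg (fun x => x.2.1) heq
        · exact congrArg (fun x => x.2.2) heq
      subst hpa; subst hqb
      have hall2 : (L.map (fun p => pyCatA p.1 p.2)).count 2 = L.length := empty_spec L (s + 1) hnil
      have hmem2 : ∀ c ∈ L.map (fun p => pyCatA p.1 p.2), (2 : Int) = c := by
        rw [← List.count_eq_length]; simpa using hall2
      have hzero : ∀ v : Int, v ≠ 2 → (L.map (fun p => pyCatA p.1 p.2)).count v = 0 := by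
        intro v hv
        rw [List.count_eq_zero]
        intro hmem; exact hv ((hmem2 v hmem).symm)
      have hfnone : ∀ v : Int, v ≠ 2 → firstIdx (L.map (fun p => pyCatA p.1 p.2)) v (s + 1) = none := by
        intro v hv
        rw [firstIdx_eq_index?]
        rw [show PySem.List.index? (L.map (fun p => pyCatA p.1 p.2)) v = none from
          (PySem.List.index?_eq_none_iff _ _).mpr (fun hmem => hv ((hmem2 v hmem).symm))]
        rfl
      refine ⟨hpq, by omega, ?_, ?_, ?_⟩
      · intro v hv
        simp only [List.map_cons, List.count_cons, hzero v hv]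
        simp
      · intro v hv
        simp only [List.map_cons, firstIdx]
        split_ifs with hh
        · simp [hds]
        · exact hfnone v hv
      · simp only [List.map_cons, PySem.List.pyGet?_zero_cons]
        exact ⟨fun _ => by omega, fun _ => trivial⟩

-- ===== VERDICT (by name: the statement is the Claim_ definition above) =====
theorem get_relation_type_spec : Claim_equal_get_relation_type := by
  intro s1 s2 _ hpre
  have hpre' : (splitU s1).length = (splitU s2).length := hpre
  unfold Spec_get_relation_type
  simp only [get_relation_type, get_relation_type_alt]
  rw [cr_eq_zip _ _ hpre']
  set l1 := splitU s1 with hl1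
  set l2 := splitU s2 with hl2
  set L := List.zip l1 l2 with hL
  have hLlen : L.length = l1.length := by rw [hL, List.length_zip, hpre']; omega
  set M := L.map (fun p => pyCatA p.1 p.2) with hM
  have hMlen : M.length = l1.length := by rw [hM, List.length_map, hLlen]
  rcases hF : (PySem.List.enumerate L 0).filter (fun p => p.2.1 != p.2.2) with _ | ⟨⟨d, a, b⟩, F'⟩
  · -- no mismatch
    have h2 : M.count 2 = l1.length := by rw [hM, ← hLlen]; exact empty_spec L 0 hF
    rw [if_neg (by omega), if_neg (by omega), if_pos h2, hF]
  · rcases F' with _ | ⟨y, F''⟩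
    · -- exactly one mismatch
      obtain ⟨hab, hsd, hcnt, hfi, hhd⟩ := single_spec L 0 d a b hF
      rw [hF]
      have hlen1 : M.count 2 + 1 = l1.length := by
        have := count2_add_diffs L 0; rw [hF] at this
        rw [hM]; rw [← hLlen]; simpa using this
      have hidx : ∀ v : Int, pyCatA a b = v →
          Option.map (fun n : Nat => (n : Int)) (PySem.List.index? M v) = some d := by
        intro v hv
        have := hfi v (by rw [← hv]; exact fun hc => hab ((cat_eq_two_iff a b).1 hc))
        rw [if_pos hv] at this
        rw [firstIdx_eq_index?] at this
        simpa using this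
      rcases cat_cases a b hab with ⟨ha, hc⟩ | ⟨ha, hb, hc⟩ | ⟨ha, hb, hc⟩
      · -- '>': left is '*'
        rw [if_pos ⟨by rw [hcnt 3 (by omega), if_pos hc], by omega⟩]
        simp [ha]
        have hI := hidx 3 hc
        simp at hI
        obtain ⟨k, hk, hkd⟩ := hI
        simp [hk, hkd]
      · -- '<': right is '*'
        rw [if_neg (by rw [hcnt 3 (by omega), if_neg (by omega)]; omega),
            if_pos ⟨by rw [hcnt 0 (by omega), if_pos hc], by omega⟩]
        simp [ha, hb]
        have hI := hidx 0 hc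
        simp at hI
        obtain ⟨k, hk, hkd⟩ := hI
        simp [hk, hkd]
      · -- temporal / brothers
        rw [if_neg (by rw [hcnt 3 (by omega), if_neg (by omega)]; omega),
            if_neg (by rw [hcnt 0 (by omega), if_neg (by omega)]; omega),
            if_neg (by omega),
            if_pos ⟨by rw [hcnt 1 (by omega), if_pos hc], by omega⟩]
        rw [hc] at hhd
        by_cases hd0 : d = 0
        · rw [if_pos (hhd.mpr hd0)]
          simp [ha, hb, hd0]
          have hI := hidx 1 hc
          simp [hd0] at hI
          simp [hI]
        · rw [if_neg (fun hh => hd0 (hhd.mp hh))]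
          simp [ha, hb, hd0]
          have hI := hidx 1 hc
          simp at hI
          obtain ⟨k, hk, hkd⟩ := hI
          simp [hk, hkd]
    · -- two or more mismatches
      have hlen2 : M.count 2 + (2 + F''.length) = l1.length := by
        have := count2_add_diffs L 0; rw [hF] at this
        rw [hM]; rw [← hLlen]; simp at this ⊢; omega
      rw [if_neg (by omega), if_neg (by omega),
          if_neg (by omega), if_neg (by omega), hF]
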